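-- pv_equiv track=rewrite | github.com/pypi-data/pypi-mirror-403 | packages/endi/endi-2026.1.3.tar.gz/endi-2026.1.3/caerp/utils/rest/parameters.py | split_expand_fields
-- ===== SOURCE A (Python) =====
-- def split_expand_fields(expand_parameter_string: str) -> list:
--     """
--     Splits a string of fields into a list, preserving nested fields within brackets.
--     Used to manage the Fields query parameters.
--
--     >>> split_expand_fields('name,books[title,publication_date,library[name,address],number_of_pages],firstname,dateofbirth')
--     ['name', 'books[title,publication_date,library[name,address],number_of_pages]', 'firstname', 'dateofbirth']
--     """
--     result = []
--     current_field = []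
--     bracket_depth = 0
--
--     for char in expand_parameter_string:
--         if char == "," and bracket_depth == 0:
--             if current_field:
--                 result.append("".join(current_field))
--                 current_field = []
--         else:
--             current_field.append(char)
--             if char == "[":
--                 bracket_depth += 1
--             elif char == "]":
--                 bracket_depth -= 1
--
--     if current_field:
--         result.append("".join(current_field))
--
--     return result
-- ===== SOURCE B (Python) =====
-- def split_expand_fields(expand_parameter_string: str) -> list:
--     result = []
--     buffer = []
--     depth = 0
--     for piece in expand_parameter_string.split(','):
--         depth += piece.count('[') - piece.count(']')
--         buffer.append(piece)
--         if depth == 0: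
--             field = ','.join(buffer)
--             if field:
--                 result.append(field)
--             buffer = []
--     field = ','.join(buffer)
--     if field:
--         result.append(field)
--     return result
-- ===== Notes on version B (the rewrite author's own statement) =====
-- stated objective: alternative
-- what changed: Replaces the character-by-character scan with accumulator list of chars by a two-phase tokenize-then-recombine pass: split the string on ',' first, then fold over the pieces with a depth counter, re-joining buffered pieces whenever depth returns to 0.
import Mathlib
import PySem

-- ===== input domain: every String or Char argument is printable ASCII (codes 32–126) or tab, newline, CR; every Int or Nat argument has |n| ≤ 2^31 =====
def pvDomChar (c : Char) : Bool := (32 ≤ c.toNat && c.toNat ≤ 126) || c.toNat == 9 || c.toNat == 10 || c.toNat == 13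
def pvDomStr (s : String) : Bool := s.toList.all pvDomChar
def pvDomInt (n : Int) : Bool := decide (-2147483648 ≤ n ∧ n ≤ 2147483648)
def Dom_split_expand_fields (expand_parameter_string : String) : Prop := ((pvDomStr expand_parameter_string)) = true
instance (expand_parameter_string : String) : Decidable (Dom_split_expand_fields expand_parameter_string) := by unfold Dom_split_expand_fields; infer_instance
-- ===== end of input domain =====

-- B re-implements A as a two-phase tokenize-then-recombine pass (split the string on ',' first,
-- then fold over the pieces with a depth counter); same cost, different decomposition.

-- ===== PORT A =====
-- state: (result, current_field, bracket_depth); one step per character, as in A's for-loop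
def sefStepA (st : List String × List Char × Int) (c : Char) :
    List String × List Char × Int :=
  if c = ',' ∧ st.2.2 = 0 then
    if st.2.1 ≠ [] then (st.1 ++ [String.ofList st.2.1], [], st.2.2) else st
  else
    (st.1, st.2.1 ++ [c],
      if c = '[' then st.2.2 + 1 else if c = ']' then st.2.2 - 1 else st.2.2)

def split_expand_fields (expand_parameter_string : String) : List String :=
  let st := expand_parameter_string.toList.foldl sefStepA ([], [], 0)
  if st.2.1 ≠ [] then st.1 ++ [String.ofList st.2.1] else st.1

-- ===== PORT B =====
-- expand_parameter_string.split(',') is ported as List.splitOn ',' on the char list (exact for a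
-- single-character separator); piece.count('[') is List.count '[' (exact for a single-character
-- needle); ','.join(buffer) is [','].intercalate buffer.
-- state: (result, buffer, depth); one step per comma-separated piece, as in B's for-loop
def sefStepB (st : List String × List (List Char) × Int) (p : List Char) :
    List String × List (List Char) × Int :=
  let depth' := st.2.2 + (p.count '[' : Int) - (p.count ']' : Int)
  let buf' := st.2.1 ++ [p]
  if depth' = 0 then
    let field := [','].intercalate buf'
    (if field ≠ [] then st.1 ++ [String.ofList field] else st.1, [], depth')
  else
    (st.1, buf', depth')

def split_expand_fields_alt (expand_parameter_string : String) : List String :=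
  let st := (expand_parameter_string.toList.splitOn ',').foldl sefStepB ([], [], 0)
  let field := [','].intercalate st.2.1
  if field ≠ [] then st.1 ++ [String.ofList field] else st.1

-- ===== PRECONDITION & SPEC =====
def Spec_split_expand_fields (expand_parameter_string : String) (out : List String) : Prop := out = split_expand_fields_alt expand_parameter_string
instance (expand_parameter_string : String) (out : List String) : Decidable (Spec_split_expand_fields expand_parameter_string out) := by unfold Spec_split_expand_fields; infer_instance

-- ===== CLAIM (what is proved, stated in full; the proofs are below) =====
def Claim_equal_split_expand_fields : Prop := ∀ (expand_parameter_string : String), Dom_split_expand_fields expand_parameter_string → Spec_split_expand_fields expand_parameter_string (split_expand_fields expand_parameter_string)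

-- ===== LEMMAS AND PROOFS =====

-- the characters A's current_field holds at the start of a piece, given B's buffer
def sefBufRepr (bs : List (List Char)) : List Char :=
  if bs = [] then [] else [','].intercalate bs ++ [',']

theorem sef_interc_nil : [','].intercalate ([] : List (List Char)) = [] := by
  simp [List.intercalate]

theorem sef_interc_single (p : List Char) : [','].intercalate [p] = p := by
  simp [List.intercalate, List.intersperse_single]

theorem sef_interc_cons₂ (p q : List Char) (r : List (List Char)) :
    [','].intercalate (p :: q :: r) = p ++ [','] ++ [','].intercalate (q :: r) := by
  simp [List.intercalate, List.intersperse_cons₂]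

theorem sef_interc_snoc (bs : List (List Char)) (p : List Char) :
    [','].intercalate (bs ++ [p]) = sefBufRepr bs ++ p := by
  induction bs with
  | nil => simp [sefBufRepr, sef_interc_single]
  | cons b bs ih =>
    cases bs with
    | nil =>
      simp [sefBufRepr, sef_interc_cons₂, sef_interc_single]
    | cons c cs =>
      have h1 : (b :: c :: cs) ++ [p] = b :: (c :: (cs ++ [p])) := by simp
      rw [h1, sef_interc_cons₂]
      have h2 : c :: (cs ++ [p]) = (c :: cs) ++ [p] := by simp
      rw [h2, ih]
      simp [sefBufRepr, sef_interc_cons₂]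

theorem sefBufRepr_snoc (bs : List (List Char)) (p : List Char) :
    sefBufRepr (bs ++ [p]) = sefBufRepr bs ++ p ++ [','] := by
  rw [sefBufRepr, if_neg (by simp), sef_interc_snoc]

-- folding A's step over a comma-free piece appends it and shifts the depth by the bracket counts
theorem sef_runA_piece (p : List Char) (h : ',' ∉ p) (res : List String) (cur : List Char) (d : Int) :
    p.foldl sefStepA (res, cur, d)
      = (res, cur ++ p, d + (p.count '[' : Int) - (p.count ']' : Int)) := by
  induction p generalizing cur d with
  | nil => simp
  | cons c p ih =>
    have hc : c ≠ ',' := fun h' => h (h' ▸ List.mem_cons_self)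
    have hp : ',' ∉ p := fun h' => h (List.mem_cons_of_mem _ h')
    rw [List.foldl_cons, sefStepA, if_neg (by rintro ⟨h1, -⟩; exact hc h1)]
    rw [ih hp]
    refine Prod.ext rfl (Prod.ext (by simp) ?_)
    by_cases hb : c = '[' <;> by_cases hk : c = ']' <;>
      simp [hb, hk] <;> ring

-- every piece produced by splitting on ',' is comma-free
theorem sef_splitOnP_comma_free (cs : List Char) :
    ∀ p ∈ cs.splitOnP (· == ','), ',' ∉ p := by
  induction cs with
  | nil =>
    intro p hp
    simp [List.splitOnP_nil] at hp
    simp [hp]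
  | cons c cs ih =>
    intro p hp
    rw [List.splitOnP_cons] at hp
    by_cases hc : c = ','
    · rw [if_pos (by simp [hc])] at hp
      rcases List.mem_cons.mp hp with h1 | h1
      · simp [h1]
      · exact ih p h1
    · rw [if_neg (by simp [hc])] at hp
      obtain ⟨h0, t0, h'⟩ := List.exists_cons_of_ne_nil (List.splitOnP_ne_nil (· == ',') cs)
      rw [h', List.modifyHead_cons] at hp
      rcases List.mem_cons.mp hp with h1 | h1
      · subst h1
        intro hm
        rcases List.mem_cons.mp hm with h2 | h2
        · exact hc h2.symm
        · exact ih h0 (h' ▸ List.mem_cons_self) h2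
      · exact ih p (h' ▸ List.mem_cons_of_mem _ h1)

theorem sef_splitOn_comma_free (cs : List Char) :
    ∀ p ∈ cs.splitOn ',', ',' ∉ p := by
  simpa [List.splitOn] using sef_splitOnP_comma_free cs

def sefFinishA (st : List String × List Char × Int) : List String :=
  if st.2.1 ≠ [] then st.1 ++ [String.ofList st.2.1] else st.1

def sefFinishB (st : List String × List (List Char) × Int) : List String :=
  if [','].intercalate st.2.1 ≠ [] then st.1 ++ [String.ofList ([','].intercalate st.2.1)] else st.1

-- main invariant: at each piece boundary A's current_field is sefBufRepr of B's buffer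
theorem sef_main (pieces : List (List Char)) (hne : pieces ≠ [])
    (h : ∀ p ∈ pieces, ',' ∉ p) (res : List String) (bs : List (List Char)) (d : Int) :
    sefFinishA (([','].intercalate pieces).foldl sefStepA (res, sefBufRepr bs, d))
      = sefFinishB (pieces.foldl sefStepB (res, bs, d)) := by
  induction pieces generalizing res bs d with
  | nil => exact absurd rfl hne
  | cons p rest ih =>
    have hp : ',' ∉ p := h p List.mem_cons_self
    cases rest with
    | nil =>
      rw [sef_interc_single, sef_runA_piece p hp]
      rw [List.foldl_cons, List.foldl_nil, sefStepB]
      by_cases hd : d + (p.count '[' : Int) - (p.count ']' : Int) = 0 <;>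
        simp only [hd, if_pos, if_false] <;>
        simp [sefFinishA, sefFinishB, sef_interc_snoc, sef_interc_nil]
    | cons q rest' =>
      have hrest : ∀ x ∈ q :: rest', ',' ∉ x := fun x hx => h x (List.mem_cons_of_mem _ hx)
      rw [sef_interc_cons₂, List.append_assoc, List.foldl_append, sef_runA_piece p hp,
        List.singleton_append, List.foldl_cons, List.foldl_cons]
      by_cases hd : d + (p.count '[' : Int) - (p.count ']' : Int) = 0
      · have hA : sefStepA (res, sefBufRepr bs ++ p,
              d + (p.count '[' : Int) - (p.count ']' : Int)) ','
            = (if [','].intercalate (bs ++ [p]) ≠ []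
                then res ++ [String.ofList ([','].intercalate (bs ++ [p]))] else res, [],
                d + (p.count '[' : Int) - (p.count ']' : Int)) := by
          simp only [sefStepA]
          rw [← sef_interc_snoc]
          by_cases hC : [','].intercalate (bs ++ [p]) = [] <;> simp [hC, hd]
        have hB : sefStepB (res, bs, d) p
            = (if [','].intercalate (bs ++ [p]) ≠ []
                then res ++ [String.ofList ([','].intercalate (bs ++ [p]))] else res, [],
                d + (p.count '[' : Int) - (p.count ']' : Int)) := by
          simp only [sefStepB]
          rw [if_pos hd]
        rw [hA, hB]
        simpa [sefBufRepr] using ih (by simp) hrest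
          (if [','].intercalate (bs ++ [p]) ≠ []
            then res ++ [String.ofList ([','].intercalate (bs ++ [p]))] else res) []
          (d + (p.count '[' : Int) - (p.count ']' : Int))
      · have hA : sefStepA (res, sefBufRepr bs ++ p,
              d + (p.count '[' : Int) - (p.count ']' : Int)) ','
            = (res, sefBufRepr (bs ++ [p]),
                d + (p.count '[' : Int) - (p.count ']' : Int)) := by
          simp only [sefStepA]
          rw [if_neg (by rintro ⟨-, h2⟩; exact hd h2)]
          simp [sefBufRepr_snoc]
        have hB : sefStepB (res, bs, d) p
            = (res, bs ++ [p], d + (p.count '[' : Int) - (p.count ']' : Int)) := by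
          simp only [sefStepB]
          rw [if_neg hd]
        rw [hA, hB]
        exact ih (by simp) hrest res (bs ++ [p]) _

-- ===== VERDICT (by name: the statement is the Claim_ definition above) =====
theorem split_expand_fields_spec : Claim_equal_split_expand_fields := by
  intro s _
  unfold Spec_split_expand_fields split_expand_fields split_expand_fields_alt
  have h1 : s.toList = [','].intercalate (s.toList.splitOn ',') :=
    (List.intercalate_splitOn (x := ',') (xs := s.toList)).symm
  have hne : s.toList.splitOn ',' ≠ [] := by
    simp only [List.splitOn]
    exact List.splitOnP_ne_nil _ _
  have h2 := sef_main (s.toList.splitOn ',') hne (sef_splitOn_comma_free s.toList) [] [] 0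
  simp only [sefBufRepr] at h2
  conv_lhs => rw [h1]
  simpa [sefFinishA, sefFinishB] using h2
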